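-- pv_equiv track=rewrite | github.com/VincentTLe/Research-about-Dickson-Polynomial | scripts/utilities/dickson.py | classical_dickson
-- ===== SOURCE A (Python) =====
-- def classical_dickson(n: int, x: int, a: int, modulus: int | None = None) -> int:
--     """Evaluate classical first-kind Dickson polynomial E_n(x, a).
--
--     Formula:
--         E_0(x, a) = 2,
--         E_1(x, a) = x,
--         E_n(x, a) = x E_{n-1}(x, a) - a E_{n-2}(x, a).
--
--     If ``modulus`` is given, arithmetic is performed modulo ``modulus``.
--     """
--     if n < 0:
--         raise ValueError("n must be non-negative")
--
--     if modulus is not None: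
--         a %= modulus
--         x %= modulus
--
--     if n == 0:
--         return 2 % modulus if modulus else 2
--     if n == 1:
--         return x % modulus if modulus else x
--
--     prev2, prev1 = 2, x
--     for _ in range(2, n + 1):
--         cur = x * prev1 - a * prev2
--         if modulus is not None:
--             cur %= modulus
--         prev2, prev1 = prev1, cur
--
--     return prev1
-- ===== SOURCE B (Python) =====
-- def classical_dickson(n: int, x: int, a: int, modulus: int | None = None) -> int:
--     """Evaluate E_n(x, a) by Lucas-sequence fast doubling: O(log n) steps."""
--     if n < 0:
--         raise ValueError("n must be non-negative")
--
--     if modulus is not None: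
--         a %= modulus
--         x %= modulus
--
--     def red(v: int) -> int:
--         return v % modulus if modulus is not None else v
--
--     def pair(k: int):
--         # returns (E_k, E_{k+1}, a**k), each reduced when a modulus is given
--         if k == 0:
--             return red(2), red(x), red(1)
--         vk, vk1, ak = pair(k // 2)
--         v2k = red(vk * vk - 2 * ak)
--         v2k1 = red(vk * vk1 - x * ak)
--         ak2 = red(ak * ak)
--         if k % 2 == 0:
--             return v2k, v2k1, ak2
--         return v2k1, red(vk1 * vk1 - 2 * (a * ak)), red(a * ak2)
--
--     return pair(n)[0]
-- ===== Notes on version B (the rewrite author's own statement) =====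
-- stated objective: faster
-- what changed: Replaced the O(n) linear-recurrence loop by Lucas-sequence fast doubling on the bits of n (E_2k = E_k^2 - 2a^k, E_2k+1 = E_k E_k+1 - x a^k), recursing on k//2.
import Mathlib
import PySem

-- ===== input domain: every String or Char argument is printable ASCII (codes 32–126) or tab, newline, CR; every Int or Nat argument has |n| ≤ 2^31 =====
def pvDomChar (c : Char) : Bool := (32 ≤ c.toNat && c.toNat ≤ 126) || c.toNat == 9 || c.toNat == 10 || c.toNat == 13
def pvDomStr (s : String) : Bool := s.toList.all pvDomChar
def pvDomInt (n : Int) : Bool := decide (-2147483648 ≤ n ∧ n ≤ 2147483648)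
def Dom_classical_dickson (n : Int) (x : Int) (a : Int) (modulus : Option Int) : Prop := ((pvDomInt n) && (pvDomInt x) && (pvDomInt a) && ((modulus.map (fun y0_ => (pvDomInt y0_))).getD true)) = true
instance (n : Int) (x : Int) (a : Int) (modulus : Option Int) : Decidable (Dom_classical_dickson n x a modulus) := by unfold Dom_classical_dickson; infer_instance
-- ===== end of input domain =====

-- B replaces A's O(n) linear-recurrence loop by Lucas-sequence fast doubling (O(log n) ring ops).


-- ===== PORT A =====
-- literal transliteration of A: reduce a, x if a modulus is given, special-case n = 0 and
-- n = 1 (Python truthiness 'if modulus' = 'modulus is not None and modulus != 0'),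
-- then iterate the two-term recurrence over range(2, n+1).
def classical_dickson (n : Int) (x : Int) (a : Int) (modulus : Option Int) : Int :=
  let a' := match modulus with | some m => PySem.Int.mod a m | none => a
  let x' := match modulus with | some m => PySem.Int.mod x m | none => x
  if n = 0 then
    match modulus with | some m => if m = 0 then 2 else PySem.Int.mod 2 m | none => 2
  else if n = 1 then
    match modulus with | some m => if m = 0 then x' else PySem.Int.mod x' m | none => x'
  else
    ((PySem.List.pyRange 2 (n + 1) 1).foldl
      (fun (st : Int × Int) _ =>
        let cur := x' * st.2 - a' * st.1
        let cur := match modulus with | some m => PySem.Int.mod cur m | none => cur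
        (st.2, cur))
      (2, x')).2

-- ===== PORT B =====
-- red v = v % modulus when a modulus is given, else v  (Source B's red)
def dicksonRed (modulus : Option Int) (v : Int) : Int :=
  match modulus with | some m => PySem.Int.mod v m | none => v

-- Source B's pair(k): (E_k, E_{k+1}, a**k) by fast doubling on k // 2, each component reduced.
def dicksonPair (x : Int) (a : Int) (modulus : Option Int) (k : Nat) : Int × Int × Int :=
  if k = 0 then
    (dicksonRed modulus 2, dicksonRed modulus x, dicksonRed modulus 1)
  else
    let p := dicksonPair x a modulus (k / 2)
    let vk := p.1
    let vk1 := p.2.1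
    let ak := p.2.2
    let v2k := dicksonRed modulus (vk * vk - 2 * ak)
    let v2k1 := dicksonRed modulus (vk * vk1 - x * ak)
    let ak2 := dicksonRed modulus (ak * ak)
    if k % 2 = 0 then (v2k, v2k1, ak2)
    else (v2k1, dicksonRed modulus (vk1 * vk1 - 2 * (a * ak)), dicksonRed modulus (a * ak2))
  termination_by k
  decreasing_by exact Nat.div_lt_self (Nat.pos_of_ne_zero (by assumption)) (by norm_num)

def classical_dickson_alt (n : Int) (x : Int) (a : Int) (modulus : Option Int) : Int :=
  let a' := match modulus with | some m => PySem.Int.mod a m | none => a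
  let x' := match modulus with | some m => PySem.Int.mod x m | none => x
  (dicksonPair x' a' modulus n.toNat).1

-- ===== PRECONDITION & SPEC =====
-- Pre_ excludes exactly the inputs where the Python A raises: n < 0 (ValueError) and
-- modulus = 0 (ZeroDivisionError in 'a %= modulus').
def Pre_classical_dickson (n : Int) (x : Int) (a : Int) (modulus : Option Int) : Prop :=
  0 ≤ n ∧ modulus ≠ some 0
instance (n : Int) (x : Int) (a : Int) (modulus : Option Int) : Decidable (Pre_classical_dickson n x a modulus) := by unfold Pre_classical_dickson; infer_instance

def pvWitness_classical_dickson : Int × Int × Int × Option Int := (5, 3, 2, some 7)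

def Spec_classical_dickson (n : Int) (x : Int) (a : Int) (modulus : Option Int) (out : Int) : Prop := out = classical_dickson_alt n x a modulus
instance (n : Int) (x : Int) (a : Int) (modulus : Option Int) (out : Int) : Decidable (Spec_classical_dickson n x a modulus out) := by unfold Spec_classical_dickson; infer_instance

-- ===== CLAIM (what is proved, stated in full; the proofs are below) =====
def Claim_equal_classical_dickson : Prop := ∀ (n : Int) (x : Int) (a : Int) (modulus : Option Int), Dom_classical_dickson n x a modulus → Pre_classical_dickson n x a modulus → Spec_classical_dickson n x a modulus (classical_dickson n x a modulus)

-- ===== LEMMAS AND PROOFS =====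

-- the mathematical Dickson/Lucas sequence E_k(x, a)
def dV (x a : Int) : Nat → Int
  | 0 => 2
  | 1 => x
  | (k + 2) => x * dV x a (k + 1) - a * dV x a k

-- Python % (= Int.fmod) respects congruence
lemma fmod_congr {m s t : Int} (h : s ≡ t [ZMOD m]) : s.fmod m = t.fmod m := by
  have hd : m ∣ s ↔ m ∣ t := by
    rw [Int.dvd_iff_emod_eq_zero, Int.dvd_iff_emod_eq_zero, Int.ModEq] at *
    rw [h]
  rw [Int.fmod_eq_emod, Int.fmod_eq_emod, Int.ModEq.eq h]
  simp [hd]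

lemma fmod_modeq (s m : Int) : s.fmod m ≡ s [ZMOD m] := by
  rw [Int.fmod_eq_emod]
  split_ifs with h
  · show (s % m + 0) % m = s % m
    rw [add_zero, Int.emod_emod_of_dvd s (dvd_refl m)]
  · show (s % m + m) % m = s % m
    rw [show s % m + m = s % m + m * 1 by ring, Int.add_mul_emod_self_left,
      Int.emod_emod_of_dvd s (dvd_refl m)]

lemma fmod_fmod (s m : Int) : (s.fmod m).fmod m = s.fmod m :=
  Int.fmod_fmod_of_dvd s (dvd_refl m)

-- the quadratic invariant of the recurrence
lemma dV_quad (x a : Int) : ∀ k : Nat,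
    dV x a (k + 1) * dV x a (k + 1) - x * dV x a (k + 1) * dV x a k + a * (dV x a k * dV x a k)
      = a ^ k * (4 * a - x * x) := by
  intro k
  induction k with
  | zero => simp [dV]; ring
  | succ k ih =>
    show dV x a (k + 2) * dV x a (k + 2) - x * dV x a (k + 2) * dV x a (k + 1) + _ = _
    rw [show dV x a (k + 2) = x * dV x a (k + 1) - a * dV x a k from rfl]
    linear_combination a * ih

-- the doubling identities
lemma dV_doubling (x a : Int) : ∀ k : Nat,
    dV x a (2 * k) = dV x a k * dV x a k - 2 * a ^ k ∧
    dV x a (2 * k + 1) = dV x a k * dV x a (k + 1) - x * a ^ k := by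
  intro k
  induction k with
  | zero =>
    constructor
    · show dV x a 0 = dV x a 0 * dV x a 0 - 2 * a ^ 0
      simp [dV]
    · show dV x a 1 = dV x a 0 * dV x a 1 - x * a ^ 0
      simp [dV]; ring
  | succ k ih =>
    obtain ⟨ih1, ih2⟩ := ih
    have hq := dV_quad x a k
    have h2 : 2 * (k + 1) = (2 * k) + 2 := by ring
    have e1 : dV x a (2 * (k + 1)) = x * dV x a (2 * k + 1) - a * dV x a (2 * k) := by
      rw [h2]; rfl
    have e2 : dV x a (2 * (k + 1) + 1) = x * dV x a (2 * (k + 1)) - a * dV x a (2 * k + 1) := by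
      rw [h2]; rfl
    have e3 : dV x a (k + 2) = x * dV x a (k + 1) - a * dV x a k := rfl
    have P1 : dV x a (2 * (k + 1)) = dV x a (k + 1) * dV x a (k + 1) - 2 * a ^ (k + 1) := by
      rw [e1, ih1, ih2]; linear_combination -hq
    refine ⟨P1, ?_⟩
    rw [e2, P1, ih2, e3]; ring

-- Source B's pair(k) computes (red (E_k), red (E_{k+1}), red (a^k))  — "red-exact" form
lemma dicksonPair_none (x a : Int) : ∀ k : Nat,
    dicksonPair x a none k = (dV x a k, dV x a (k + 1), a ^ k) := by
  intro k
  induction k using Nat.strong_induction_on with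
  | _ k ih =>
    rcases Nat.eq_zero_or_pos k with hk | hk
    · subst hk; rw [dicksonPair]; simp [dicksonRed, dV]
    · rw [dicksonPair]
      have hne : ¬ k = 0 := Nat.pos_iff_ne_zero.mp hk
      have hlt : k / 2 < k := Nat.div_lt_self hk (by norm_num)
      rw [if_neg hne, ih (k / 2) hlt]
      obtain ⟨d1, d2⟩ := dV_doubling x a (k / 2)
      by_cases hmod : k % 2 = 0
      · have hk2 : 2 * (k / 2) = k := by omega
        rw [hk2] at d1 d2
        simp only [dicksonRed, hmod]
        refine Prod.ext d1.symm (Prod.ext d2.symm ?_)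
        show a ^ (k / 2) * a ^ (k / 2) = a ^ k
        rw [← pow_add]; congr 1; omega
      · obtain ⟨d3, _⟩ := dV_doubling x a (k / 2 + 1)
        have hk2 : 2 * (k / 2) + 1 = k := by omega
        have hk3 : 2 * (k / 2 + 1) = k + 1 := by omega
        rw [hk2] at d2
        rw [hk3] at d3
        simp only [dicksonRed, if_neg hmod]
        refine Prod.ext d2.symm (Prod.ext ?_ ?_)
        · rw [d3]
          show dV x a (k / 2 + 1) * dV x a (k / 2 + 1) - 2 * (a * a ^ (k / 2)) = _
          rw [← pow_succ']
        · show a * (a ^ (k / 2) * a ^ (k / 2)) = a ^ k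
          rw [← pow_add, ← pow_succ']
          congr 1; omega

lemma dicksonPair_some (x a m : Int) : ∀ k : Nat,
    dicksonPair x a (some m) k
      = ((dV x a k).fmod m, (dV x a (k + 1)).fmod m, ((a ^ k : Int)).fmod m) := by
  intro k
  induction k using Nat.strong_induction_on with
  | _ k ih =>
    rcases Nat.eq_zero_or_pos k with hk | hk
    · subst hk; rw [dicksonPair]; simp [dicksonRed, dV, PySem.Int.mod]
    · rw [dicksonPair]
      have hne : ¬ k = 0 := Nat.pos_iff_ne_zero.mp hk
      have hlt : k / 2 < k := Nat.div_lt_self hk (by norm_num)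
      rw [if_neg hne, ih (k / 2) hlt]
      set j := k / 2 with hj
      obtain ⟨d1, d2⟩ := dV_doubling x a j
      -- congruences for the three doubled components
      have c1 : (dV x a j).fmod m * (dV x a j).fmod m - 2 * ((a ^ j : Int)).fmod m
          ≡ dV x a (2 * j) [ZMOD m] := by
        rw [d1]
        exact ((fmod_modeq _ m).mul (fmod_modeq _ m)).sub ((Int.ModEq.refl 2).mul (fmod_modeq _ m))
      have c2 : (dV x a j).fmod m * (dV x a (j + 1)).fmod m - x * ((a ^ j : Int)).fmod m
          ≡ dV x a (2 * j + 1) [ZMOD m] := by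
        rw [d2]
        exact ((fmod_modeq _ m).mul (fmod_modeq _ m)).sub ((Int.ModEq.refl x).mul (fmod_modeq _ m))
      have c3 : ((a ^ j : Int)).fmod m * ((a ^ j : Int)).fmod m ≡ (a ^ (j + j) : Int) [ZMOD m] := by
        rw [pow_add]
        exact (fmod_modeq _ m).mul (fmod_modeq _ m)
      rcases Nat.even_or_odd k with he | ho
      · have hmod : k % 2 = 0 := Nat.even_iff.mp he
        have hk2 : 2 * j = k := by omega
        simp only [dicksonRed, hmod, PySem.Int.mod]
        rw [hk2] at c1 c2
        refine Prod.ext ?_ (Prod.ext ?_ ?_)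
        · simpa using fmod_congr c1
        · simpa using fmod_congr c2
        · have : j + j = k := by omega
          rw [this] at c3
          simpa using fmod_congr c3
      · have hodd : k % 2 = 1 := Nat.odd_iff.mp ho
        have hmod : ¬ k % 2 = 0 := by omega
        have hk2 : 2 * j + 1 = k := by omega
        simp only [dicksonRed, if_neg hmod, PySem.Int.mod]
        obtain ⟨d3, _⟩ := dV_doubling x a (j + 1)
        have hk3 : 2 * (j + 1) = k + 1 := by omega
        rw [hk2] at c2
        refine Prod.ext ?_ (Prod.ext ?_ ?_)
        · simpa using fmod_congr c2
        · have c4 : (dV x a (j + 1)).fmod m * (dV x a (j + 1)).fmod m - 2 * (a * ((a ^ j : Int)).fmod m)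
              ≡ dV x a (k + 1) [ZMOD m] := by
            rw [← hk3, d3]
            have : dV x a (j + 1) * dV x a (j + 1) - 2 * (a * (a ^ j : Int)) = dV x a (j + 1) * dV x a (j + 1) - 2 * a ^ (j + 1) := by
              rw [pow_succ]; ring
            rw [← this]
            exact ((fmod_modeq _ m).mul (fmod_modeq _ m)).sub ((Int.ModEq.refl 2).mul ((Int.ModEq.refl a).mul (fmod_modeq _ m)))
          simpa using fmod_congr c4
        · have c5 : a * ((((a ^ j : Int)).fmod m * ((a ^ j : Int)).fmod m).fmod m) ≡ (a ^ k : Int) [ZMOD m] := by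
            have : (a ^ k : Int) = a * a ^ (j + j) := by
              rw [← pow_succ']; congr 1; omega
            rw [this]
            exact (Int.ModEq.refl a).mul ((fmod_modeq _ m).trans c3)
          simpa using fmod_congr c5

-- the A-side loop state sequence: u 0 = 2, u 1 = x', u (j+2) = red (x'·u(j+1) - a'·u j)
def uA (x a : Int) (modulus : Option Int) : Nat → Int
  | 0 => 2
  | 1 => x
  | (j + 2) => dicksonRed modulus (x * uA x a modulus (j + 1) - a * uA x a modulus j)

-- the foldl over range(2, n+1) iterates the step function length-many times
lemma foldl_const_step {α : Type} (g : α → α) : ∀ (l : List Int) (p : α),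
    l.foldl (fun s _ => g s) p = g^[l.length] p := by
  intro l
  induction l with
  | nil => intro p; simp
  | cons h t ih =>
    intro p
    simp [List.foldl_cons, ih, Function.iterate_succ_apply]

lemma uA_iter (x a : Int) (modulus : Option Int) : ∀ j : Nat,
    (fun (st : Int × Int) =>
        (st.2, dicksonRed modulus (x * st.2 - a * st.1)))^[j] (2, x)
      = (uA x a modulus j, uA x a modulus (j + 1)) := by
  intro j
  induction j with
  | zero => simp [uA]
  | succ j ih =>
    rw [Function.iterate_succ_apply', ih]
    rfl

lemma uA_none (x a : Int) : ∀ j : Nat, uA x a none j = dV x a j := by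
  intro j
  induction j using Nat.strong_induction_on with
  | _ j ih =>
    match j with
    | 0 => rfl
    | 1 => rfl
    | (j + 2) =>
      show dicksonRed none _ = _
      rw [dicksonRed, ih (j + 1) (by omega), ih j (by omega)]
      rfl

lemma uA_some_modeq (x a m : Int) : ∀ j : Nat, uA x a (some m) j ≡ dV x a j [ZMOD m] := by
  intro j
  induction j using Nat.strong_induction_on with
  | _ j ih =>
    match j with
    | 0 => rfl
    | 1 => rfl
    | (j + 2) =>
      show dicksonRed (some m) _ ≡ _ [ZMOD m]
      rw [dicksonRed, PySem.Int.mod]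
      refine (fmod_modeq _ m).trans ?_
      exact (((Int.ModEq.refl x).mul (ih (j + 1) (by omega))).sub
        ((Int.ModEq.refl a).mul (ih j (by omega)))).trans (Int.ModEq.refl _)

lemma uA_some_fixed (x a m : Int) (j : Nat) (hj : 2 ≤ j) :
    (uA x a (some m) j).fmod m = uA x a (some m) j := by
  match j, hj with
  | (j + 2), _ =>
    show (dicksonRed (some m) _).fmod m = dicksonRed (some m) _
    rw [dicksonRed, PySem.Int.mod, fmod_fmod]

lemma uA_some_eq (x a m : Int) (j : Nat) (hj : 2 ≤ j) :
    uA x a (some m) j = (dV x a j).fmod m := by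
  rw [← uA_some_fixed x a m j hj]
  exact fmod_congr (uA_some_modeq x a m j)

-- ===== VERDICT (by name: the statement is the Claim_ definition above) =====
theorem classical_dickson_spec : Claim_equal_classical_dickson := by
  intro n x a modulus _ hpre
  obtain ⟨hn, hm0⟩ := hpre
  unfold Spec_classical_dickson classical_dickson classical_dickson_alt
  rcases modulus with _ | m
  · -- no modulus
    simp only []
    rcases eq_or_ne n 0 with h0 | h0
    · subst h0; simp [dicksonPair_none, dV]
    rcases eq_or_ne n 1 with h1 | h1
    · subst h1; simp [dicksonPair_none, dV]
    · rw [if_neg h0, if_neg h1]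
      have h2 : (2 : Int) ≤ n := by omega
      rw [foldl_const_step, PySem.List.length_pyRange_one]
      have hlen : (n + 1 - 2).toNat = n.toNat - 1 := by omega
      rw [hlen]
      have := uA_iter x a none (n.toNat - 1)
      simp only [dicksonRed] at this ⊢
      rw [this, dicksonPair_none]
      simp only []
      rw [uA_none]
      congr 1
      omega
  · -- modulus = some m, m ≠ 0
    have hm : m ≠ 0 := by rintro rfl; exact hm0 rfl
    simp only []
    set x' := PySem.Int.mod x m with hx'
    set a' := PySem.Int.mod a m with ha'
    rcases eq_or_ne n 0 with h0 | h0
    · subst h0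
      rw [if_pos rfl]
      simp only [if_neg hm, dicksonPair_some, Int.toNat_zero]
      show PySem.Int.mod 2 m = (dV x' a' 0).fmod m
      rw [PySem.Int.mod]; rfl
    rcases eq_or_ne n 1 with h1 | h1
    · subst h1
      rw [if_neg h0, if_pos rfl]
      simp only [if_neg hm, dicksonPair_some, Int.toNat_one]
      show PySem.Int.mod x' m = (dV x' a' 1).fmod m
      rw [PySem.Int.mod]; rfl
    · rw [if_neg h0, if_neg h1]
      rw [foldl_const_step, PySem.List.length_pyRange_one]
      have hlen : (n + 1 - 2).toNat = n.toNat - 1 := by omega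
      rw [hlen]
      have hiter := uA_iter x' a' (some m) (n.toNat - 1)
      simp only [dicksonRed] at hiter ⊢
      rw [hiter, dicksonPair_some]
      simp only []
      have hnn : n.toNat - 1 + 1 = n.toNat := by omega
      rw [hnn, uA_some_eq x' a' m n.toNat (by omega)]
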